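-- pv_equiv track=rewrite | github.com/nick-silantro/substrate-test | _system/scripts/schema-update-relationship.py | update_fields_in_relationship_block
-- ===== SOURCE A (Python) =====
-- def update_fields_in_relationship_block(content: str, rel_name: str, updates: dict) -> tuple[str, list]:
--     """
--     Update fields within a relationship block.
--     Relationships are indented 6 spaces; their fields are indented 8 spaces.
--     Fields not found in the block are appended before the block exits.
--     Returns (updated_content, list_of_updated_fields).
--     """
--     lines = content.split("\n")
--     result = []
--     in_block = False
--     updated_fields = []
--     pending = dict(updates)
--     i = 0
--
--     while i < len(lines):
--         line = lines[i]
--         stripped = line.lstrip()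
--         indent = len(line) - len(stripped)
--
--         # Relationship name at 6-space indent
--         if line.rstrip() == f"      {rel_name}:" or line.startswith(f"      {rel_name}: "):
--             in_block = True
--             result.append(line)
--             i += 1
--             continue
--
--         if in_block:
--             # Block exits when indent drops to <= 6 (next sibling or parent section)
--             if stripped and indent <= 6:
--                 # Append any fields not yet found
--                 for field, value in list(pending.items()):
--                     result.append(f'        {field}: "{value}"')
--                     updated_fields.append(field)
--                     del pending[field]
--                 in_block = False
--                 result.append(line)
--                 i += 1
--                 continue
--
--             matched = False
--             for field in list(pending.keys()):
--                 if line.startswith(f"        {field}: ") or line.rstrip() == f"        {field}:":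
--                     result.append(f'        {field}: "{pending[field]}"')
--                     updated_fields.append(field)
--                     del pending[field]
--                     matched = True
--                     break
--
--             if not matched:
--                 result.append(line)
--             i += 1
--             continue
--
--         result.append(line)
--         i += 1
--
--     # Handle block at end of file
--     if pending and in_block:
--         for field, value in pending.items():
--             result.append(f'        {field}: "{value}"')
--             updated_fields.append(field)
--
--     return "\n".join(result), updated_fields
-- ===== SOURCE B (Python) =====
-- def update_fields_in_relationship_block(content: str, rel_name: str, updates: dict) -> tuple[str, list]:
--     """Boundary-based rewrite: locate the block's start and end once, transform
--     only the segment in between, and splice the pieces back together."""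
--     lines = content.split("\n")
--     head = "      " + rel_name + ":"
--
--     def is_rel(line):
--         return line.rstrip() == head or line.startswith(head + " ")
--
--     def is_exit(line):
--         s = line.lstrip()
--         return bool(s) and len(line) - len(s) <= 6 and not is_rel(line)
--
--     start = next((i for i, l in enumerate(lines) if is_rel(l)), None)
--     if start is None:
--         return "\n".join(lines), []
--
--     rest = lines[start + 1:]
--     k = next((j for j, l in enumerate(rest) if is_exit(l)), len(rest))
--     seg, after = rest[:k], rest[k:]
--
--     pending = dict(updates)
--     updated = []
--     body = []
--     for line in seg:
--         f = None
--         if not is_rel(line):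
--             f = next((f for f in pending
--                       if line.startswith("        " + f + ": ")
--                       or line.rstrip() == "        " + f + ":"), None)
--         if f is None:
--             body.append(line)
--         else:
--             body.append(f'        {f}: "{pending.pop(f)}"')
--             updated.append(f)
--
--     tail = [f'        {f}: "{v}"' for f, v in pending.items()]
--     updated.extend(pending.keys())
--     return "\n".join(lines[:start + 1] + body + tail + after), updated
-- ===== Notes on version B (the rewrite author's own statement) =====
-- stated objective: alternative
-- what changed: A is a single-pass state machine carrying an in_block flag through every line; B first computes the block's boundaries (start index of the relationship line, end index of the first exit line), transforms only the enclosed segment, and splices prefix + segment + appended fields + suffix back together.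
import Mathlib
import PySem

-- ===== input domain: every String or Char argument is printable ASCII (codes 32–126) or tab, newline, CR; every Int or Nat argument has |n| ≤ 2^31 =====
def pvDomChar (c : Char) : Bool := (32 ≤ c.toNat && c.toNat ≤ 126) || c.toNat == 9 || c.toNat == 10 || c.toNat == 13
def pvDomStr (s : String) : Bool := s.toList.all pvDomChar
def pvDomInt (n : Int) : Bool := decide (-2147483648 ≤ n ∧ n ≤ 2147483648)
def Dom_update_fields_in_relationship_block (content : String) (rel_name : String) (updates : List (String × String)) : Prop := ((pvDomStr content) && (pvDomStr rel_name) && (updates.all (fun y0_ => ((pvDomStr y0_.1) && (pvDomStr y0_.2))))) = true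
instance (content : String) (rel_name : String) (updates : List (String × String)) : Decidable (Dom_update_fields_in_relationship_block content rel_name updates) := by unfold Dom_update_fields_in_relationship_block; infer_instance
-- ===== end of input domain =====

-- B replaces A's single-pass in-block state machine by an explicit boundary computation
-- (find block start, find block end, transform only the enclosed segment, splice) — objective: alternative decomposition, same cost.


-- ===== PORT A =====
-- f'        {field}: "{value}"'
def pvFmt (f v : String) : String := "        " ++ f ++ ": \"" ++ v ++ "\""

-- A's while loop: line-by-line state machine over (in_block, pending, result, updated)
def pvLoopA (rel : String) (lines : List String) (inb : Bool)
    (pending : PySem.Dict String String) (result updated : List String) :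
    List String × List String :=
  match lines with
  | [] =>
      -- if pending and in_block: append remaining fields
      if !pending.items.isEmpty && inb then
        (result ++ pending.items.map (fun p => pvFmt p.1 p.2),
         updated ++ pending.items.map (fun p => p.1))
      else (result, updated)
  | line :: rest =>
      let stripped := PySem.Str.lstrip line
      let indent := PySem.Str.len line - PySem.Str.len stripped
      if PySem.Str.rstrip line == "      " ++ rel ++ ":"
          || PySem.Str.startswith line ("      " ++ rel ++ ": ") then
        pvLoopA rel rest true pending (result ++ [line]) updated
      else if inb then
        if !(stripped == "") && decide (indent ≤ 6) then
          -- for field, value in list(pending.items()): append; del pending[field]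
          let st := pending.items.foldl
            (fun (st : List String × List String × PySem.Dict String String) p =>
              (st.1 ++ [pvFmt p.1 p.2], st.2.1 ++ [p.1], st.2.2.erase p.1))
            (result, updated, pending)
          pvLoopA rel rest false st.2.2 (st.1 ++ [line]) st.2.1
        else
          match pending.keys.find? (fun f =>
              PySem.Str.startswith line ("        " ++ f ++ ": ")
              || PySem.Str.rstrip line == "        " ++ f ++ ":") with
          | some f =>
              pvLoopA rel rest true (pending.erase f)
                (result ++ [pvFmt f (pending.getD f "")]) (updated ++ [f])
          | none => pvLoopA rel rest true pending (result ++ [line]) updated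
      else
        pvLoopA rel rest false pending (result ++ [line]) updated

def update_fields_in_relationship_block (content : String) (rel_name : String)
    (updates : List (String × String)) : String × List String :=
  let lines := (PySem.Str.split? content "\n").getD []
  let r := pvLoopA rel_name lines false (PySem.Dict.ofList updates) [] []
  (PySem.Str.join "\n" r.1, r.2)

-- ===== PORT B =====
-- is_rel(line)
def pvIsRel (rel line : String) : Bool :=
  let head := "      " ++ rel ++ ":"
  PySem.Str.rstrip line == head || PySem.Str.startswith line (head ++ " ")

-- is_exit(line)
def pvIsExit (rel line : String) : Bool :=
  let s := PySem.Str.lstrip line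
  !(s == "") && decide (PySem.Str.len line - PySem.Str.len s ≤ 6) && !(pvIsRel rel line)

-- next((f for f in pending if line matches f), None)
def pvFindField (line : String) (keys : List String) : Option String :=
  keys.find? (fun f =>
    PySem.Str.startswith line ("        " ++ f ++ ": ")
    || PySem.Str.rstrip line == "        " ++ f ++ ":")

-- B's for loop over the segment: (body, updated, pending) accumulator
def pvBodyLoop (rel : String) (seg : List String) (pending : PySem.Dict String String)
    (body updated : List String) : List String × List String × PySem.Dict String String :=
  match seg with
  | [] => (body, updated, pending)
  | line :: rest =>
      let f? := if pvIsRel rel line then none else pvFindField line pending.keys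
      match f? with
      | none => pvBodyLoop rel rest pending (body ++ [line]) updated
      | some f =>
          pvBodyLoop rel rest (pending.erase f)
            (body ++ [pvFmt f (pending.getD f "")]) (updated ++ [f])

def update_fields_in_relationship_block_alt (content : String) (rel_name : String)
    (updates : List (String × String)) : String × List String :=
  let lines := (PySem.Str.split? content "\n").getD []
  match lines.findIdx? (fun l => pvIsRel rel_name l) with
  | none => (PySem.Str.join "\n" lines, [])
  | some start =>
      let rest := lines.drop (start + 1)
      let k := (rest.findIdx? (fun l => pvIsExit rel_name l)).getD rest.length
      let seg := rest.take k
      let after := rest.drop k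
      let r := pvBodyLoop rel_name seg (PySem.Dict.ofList updates) [] []
      let tail := r.2.2.items.map (fun p => pvFmt p.1 p.2)
      (PySem.Str.join "\n" (lines.take (start + 1) ++ r.1 ++ tail ++ after),
       r.2.1 ++ r.2.2.items.map (fun p => p.1))

-- ===== PRECONDITION & SPEC =====
def Spec_update_fields_in_relationship_block (content : String) (rel_name : String) (updates : List (String × String)) (out : String × List String) : Prop := out = update_fields_in_relationship_block_alt content rel_name updates
instance (content : String) (rel_name : String) (updates : List (String × String)) (out : String × List String) : Decidable (Spec_update_fields_in_relationship_block content rel_name updates out) := by unfold Spec_update_fields_in_relationship_block; infer_instance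

-- ===== CLAIM (what is proved, stated in full; the proofs are below) =====
def Claim_equal_update_fields_in_relationship_block : Prop := ∀ (content : String) (rel_name : String) (updates : List (String × String)), Dom_update_fields_in_relationship_block content rel_name updates → Spec_update_fields_in_relationship_block content rel_name updates (update_fields_in_relationship_block content rel_name updates)

-- ===== LEMMAS AND PROOFS =====

theorem pvRelCond (rel line : String) :
    (PySem.Str.rstrip line == "      " ++ rel ++ ":"
      || PySem.Str.startswith line ("      " ++ rel ++ ": ")) = pvIsRel rel line := by
  simp only [pvIsRel, String.append_assoc]
  norm_num
  rw [show (": ").toList = (":").toList ++ (" ").toList from by decide]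
theorem loopA_rel (rel l : String) (hl : pvIsRel rel l = true) (rest : List String)
    (inb : Bool) (p : PySem.Dict String String) (res upd : List String) :
    pvLoopA rel (l :: rest) inb p res upd = pvLoopA rel rest true p (res ++ [l]) upd := by
  rw [pvLoopA]
  simp only [pvRelCond, hl, if_pos]

theorem loopA_notrel (rel : String) (pre : List String)
    (hpre : ∀ l ∈ pre, pvIsRel rel l = false) (rest : List String)
    (p : PySem.Dict String String) (res upd : List String) :
    pvLoopA rel (pre ++ rest) false p res upd = pvLoopA rel rest false p (res ++ pre) upd := by
  induction pre generalizing res with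
  | nil => simp
  | cons l pre ih =>
    have hl : pvIsRel rel l = false := hpre l (by simp)
    rw [List.cons_append, pvLoopA]
    simp only [pvRelCond, hl, Bool.false_eq_true, if_false]
    rw [ih (fun x hx => hpre x (by simp [hx]))]
    simp
theorem loopA_empty (rel : String) (lines : List String)
    (p : PySem.Dict String String) (hp : p.items = []) :
    ∀ (inb : Bool) (res upd : List String),
      pvLoopA rel lines inb p res upd = (res ++ lines, upd) := by
  induction lines with
  | nil =>
    intro inb res upd
    rw [pvLoopA]
    simp [hp]
  | cons l rest ih =>
    intro inb res upd
    rw [pvLoopA]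
    by_cases hl : pvIsRel rel l = true
    · simp only [pvRelCond, hl, if_pos, ih true]
      simp
    · simp only [Bool.not_eq_true] at hl
      simp only [pvRelCond, hl, Bool.false_eq_true, if_false]
      cases inb with
      | false => simp [ih]
      | true =>
        simp only [if_true]
        split
        · simp only [hp, List.foldl_nil, ih]
          simp
        · have hk : p.keys = [] := by
            simp [PySem.Dict.keys, hp]
          simp only [hk, List.find?_nil, ih]
          simp
theorem flush_fold (l : List (String × String)) (res upd : List String)
    (d : PySem.Dict String String) :
    l.foldl (fun (st : List String × List String × PySem.Dict String String) p =>
        (st.1 ++ [pvFmt p.1 p.2], st.2.1 ++ [p.1], st.2.2.erase p.1)) (res, upd, d)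
      = (res ++ l.map (fun p => pvFmt p.1 p.2), upd ++ l.map (fun p => p.1),
         l.foldl (fun d p => d.erase p.1) d) := by
  induction l generalizing res upd d with
  | nil => simp
  | cons q l ih => simp [ih]

theorem items_foldl_erase (l : List (String × String)) (d : PySem.Dict String String) :
    (l.foldl (fun (d : PySem.Dict String String) p => d.erase p.1) d).items
      = d.items.filter (fun q => l.all (fun p => !(q.1 == p.1))) := by
  induction l generalizing d with
  | nil => simp
  | cons q l ih =>
    rw [List.foldl_cons, ih]
    simp [PySem.Dict.erase, List.filter_filter]
    congr 1
    funext r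
    rw [Bool.and_comm]

theorem erase_all_self (d : PySem.Dict String String) :
    (d.items.foldl (fun (d' : PySem.Dict String String) p => d'.erase p.1) d).items = [] := by
  rw [items_foldl_erase]
  rw [List.filter_eq_nil_iff]
  intro q hq
  simp
  exact ⟨q.2, by rw [← @Prod.mk.eta _ _ q] at hq; exact hq⟩

theorem bodyLoop_acc (rel : String) (seg : List String) (p : PySem.Dict String String)
    (b u : List String) :
    pvBodyLoop rel seg p b u
      = (b ++ (pvBodyLoop rel seg p [] []).1, u ++ (pvBodyLoop rel seg p [] []).2.1,
         (pvBodyLoop rel seg p [] []).2.2) := by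
  induction seg generalizing p b u with
  | nil => simp [pvBodyLoop]
  | cons l rest ih =>
    rw [pvBodyLoop, pvBodyLoop]
    cases hl : (if pvIsRel rel l then none else pvFindField l p.keys) with
    | none => simp only [ih p (b ++ [l]) u]; simp [ih p [l] []]
    | some f =>
        simp only [ih (p.erase f) (b ++ [pvFmt f (p.getD f "")]) (u ++ [f])]
        simp [ih (p.erase f) [pvFmt f (p.getD f "")] [f]]
theorem loopA_body (rel : String) (seg : List String)
    (hseg : ∀ l ∈ seg, pvIsExit rel l = false) (after : List String)
    (p : PySem.Dict String String) (res upd : List String) :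
    pvLoopA rel (seg ++ after) true p res upd
      = pvLoopA rel after true (pvBodyLoop rel seg p res upd).2.2
          (pvBodyLoop rel seg p res upd).1 (pvBodyLoop rel seg p res upd).2.1 := by
  induction seg generalizing p res upd with
  | nil => simp [pvBodyLoop]
  | cons l seg ih =>
    have hseg' : ∀ x ∈ seg, pvIsExit rel x = false := fun x hx => hseg x (by simp [hx])
    rw [List.cons_append, pvBodyLoop]
    by_cases hl : pvIsRel rel l = true
    · rw [loopA_rel rel l hl]
      simp only [hl, if_true]
      exact ih hseg' p (res ++ [l]) upd
    · simp only [Bool.not_eq_true] at hl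
      have hX : (!(PySem.Str.lstrip l == "")
          && decide (PySem.Str.len l - PySem.Str.len (PySem.Str.lstrip l) ≤ 6)) = false := by
        have he := hseg l (by simp)
        simp only [pvIsExit, hl] at he
        simpa using he
      rw [pvLoopA]
      simp only [pvRelCond, hl, Bool.false_eq_true, if_false, if_true, hX]
      simp only [pvFindField]
      cases hf : p.keys.find? (fun f =>
          PySem.Str.startswith l ("        " ++ f ++ ": ")
          || PySem.Str.rstrip l == "        " ++ f ++ ":") with
      | none => simpa [hf] using ih hseg' p (res ++ [l]) upd
      | some f => simpa [hf] using ih hseg' (p.erase f) (res ++ [pvFmt f (p.getD f "")]) (upd ++ [f])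

theorem loopA_after (rel : String) (after : List String)
    (h : after = [] ∨ ∃ e rest2, after = e :: rest2 ∧ pvIsExit rel e = true)
    (p : PySem.Dict String String) (res upd : List String) :
    pvLoopA rel after true p res upd
      = (res ++ p.items.map (fun q => pvFmt q.1 q.2) ++ after,
         upd ++ p.items.map (fun q => q.1)) := by
  rcases h with rfl | ⟨e, rest2, rfl, he⟩
  · rw [pvLoopA]
    by_cases hp : p.items.isEmpty
    · rw [List.isEmpty_iff] at hp
      simp [hp]
    · simp [hp]
  · have hl : pvIsRel rel e = false := by
      by_contra hc
      simp only [Bool.not_eq_false] at hc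
      simp [pvIsExit, hc] at he
    have hX : (!(PySem.Str.lstrip e == "")
        && decide (PySem.Str.len e - PySem.Str.len (PySem.Str.lstrip e) ≤ 6)) = true := by
      simp only [pvIsExit, hl] at he
      simpa using he
    rw [pvLoopA]
    simp only [pvRelCond, hl, Bool.false_eq_true, if_false, if_true, hX]
    rw [flush_fold]
    simp only []
    rw [loopA_empty rel rest2 _ (erase_all_self p)]
    simp

-- ===== VERDICT (by name: the statement is the Claim_ definition above) =====
theorem update_fields_in_relationship_block_spec : Claim_equal_update_fields_in_relationship_block := by
  intro content rel updates _
  unfold Spec_update_fields_in_relationship_block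
  unfold update_fields_in_relationship_block update_fields_in_relationship_block_alt
  simp only []
  set lines := (PySem.Str.split? content "\n").getD [] with hlines
  set d := PySem.Dict.ofList updates with hd
  cases hidx : lines.findIdx? (fun l => pvIsRel rel l) with
  | none =>
    have hall : ∀ l ∈ lines, pvIsRel rel l = false := List.findIdx?_eq_none_iff.mp hidx
    have h1 : pvLoopA rel lines false d [] [] = ([] ++ lines, []) := by
      have := loopA_notrel rel lines hall [] d [] []
      rw [List.append_nil] at this
      rw [this, pvLoopA]
      simp
    rw [h1]
    simp
  | some start =>
    obtain ⟨hstart, hP, hprev⟩ := List.findIdx?_eq_some_iff_getElem.mp hidx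
    set pre := lines.take start with hpre_def
    set c := lines[start] with hc_def
    set rest := lines.drop (start + 1) with hrest_def
    have hdec : lines = pre ++ c :: rest := by
      conv_lhs => rw [← List.take_append_drop start lines]
      rw [List.drop_eq_getElem_cons hstart]
    have hpre : ∀ l ∈ pre, pvIsRel rel l = false := by
      intro l hl
      rw [List.mem_take_iff_getElem] at hl
      obtain ⟨j, hj, rfl⟩ := hl
      exact Bool.not_eq_true _ |>.mp (hprev j (by omega))
    have htake : lines.take (start + 1) = pre ++ [c] := by
      rw [List.take_add_one, hpre_def, hc_def]
      simp [List.getElem?_eq_getElem hstart]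
    set k := (rest.findIdx? (fun l => pvIsExit rel l)).getD rest.length with hk
    have hseg : ∀ l ∈ rest.take k, pvIsExit rel l = false := by
      cases hfi : rest.findIdx? (fun l => pvIsExit rel l) with
      | none =>
        intro l hl
        exact List.findIdx?_eq_none_iff.mp hfi l (List.take_subset _ _ hl)
      | some k0 =>
        obtain ⟨hk0, hE, hEprev⟩ := List.findIdx?_eq_some_iff_getElem.mp hfi
        intro l hl
        rw [hk, hfi] at hl
        simp only [Option.getD_some] at hl
        rw [List.mem_take_iff_getElem] at hl
        obtain ⟨j, hj, rfl⟩ := hl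
        exact Bool.not_eq_true _ |>.mp (hEprev j (by omega))
    have hafter : rest.drop k = [] ∨
        ∃ e r2, rest.drop k = e :: r2 ∧ pvIsExit rel e = true := by
      cases hfi : rest.findIdx? (fun l => pvIsExit rel l) with
      | none =>
        left
        rw [hk, hfi]
        simp
      | some k0 =>
        obtain ⟨hk0, hE, hEprev⟩ := List.findIdx?_eq_some_iff_getElem.mp hfi
        right
        refine ⟨rest[k0], rest.drop (k0 + 1), ?_, hE⟩
        rw [hk, hfi]
        simp only [Option.getD_some]
        exact List.drop_eq_getElem_cons hk0
    have hA : pvLoopA rel lines false d [] []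
        = ((pvBodyLoop rel (rest.take k) d (pre ++ [c]) []).1
            ++ (pvBodyLoop rel (rest.take k) d (pre ++ [c]) []).2.2.items.map (fun q => pvFmt q.1 q.2)
            ++ rest.drop k,
           (pvBodyLoop rel (rest.take k) d (pre ++ [c]) []).2.1
            ++ (pvBodyLoop rel (rest.take k) d (pre ++ [c]) []).2.2.items.map (fun q => q.1)) := by
      conv_lhs => rw [hdec]
      rw [loopA_notrel rel pre hpre (c :: rest) d [] []]
      rw [loopA_rel rel c hP rest false d ([] ++ pre) []]
      conv_lhs => rw [show rest = rest.take k ++ rest.drop k from (List.take_append_drop k rest).symm]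
      rw [loopA_body rel (rest.take k) hseg (rest.drop k) d (([] ++ pre) ++ [c]) []]
      rw [loopA_after rel (rest.drop k) hafter]
      simp
    rw [hA, bodyLoop_acc rel (rest.take k) d (pre ++ [c]) []]
    simp only [List.append_assoc, List.cons_append, List.nil_append, htake]
    rw [← hrest_def, ← hk]
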